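-- pv_equiv track=rewrite | github.com/dojorio/dojolive | 2020/20200718 - miojo - python/miojo_test.py | preparo
-- ===== SOURCE A (Python) =====
-- from math import gcd
--
-- def preparo(ampulheta_1, ampulheta_2):
--     if gcd(ampulheta_1,ampulheta_2) not in (1,3):
--         return None
--
--     tempo1 = 0
--     tempo2 = 0
--     while True:
--         if tempo1 <= tempo2:
--             tempo1 += ampulheta_1
--
--         if tempo1 % ampulheta_2 == 3:
--             return tempo1
--
--         if tempo2 <= tempo1:
--             tempo2 += ampulheta_2
--
--         if tempo2 % ampulheta_1 == 3:
--             return tempo2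
-- ===== SOURCE B (Python) =====
-- from math import gcd
--
--
-- def _inv(x, m):
--     # modular inverse of x mod m (m >= 1, gcd(x, m) == 1), iterative extended Euclid
--     r0, r1 = x % m, m
--     u0, u1 = 1, 0
--     while r1:
--         q = r0 // r1
--         r0, r1 = r1, r0 - q * r1
--         u0, u1 = u1, u0 - q * u1
--     return u0 % m
--
--
-- def _solvek(step, mod):
--     # least k >= 1 with (k*step) % mod == 3, or None; assumes gcd(step, mod) in (1, 3)
--     if mod <= 3:
--         return None
--     g = gcd(step, mod)
--     u = _inv(step // g, mod // g)
--     return (3 // g) * u % (mod // g)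
--
--
-- def preparo(ampulheta_1, ampulheta_2):
--     if gcd(ampulheta_1, ampulheta_2) not in (1, 3):
--         return None
--     candidates = [k * s for s, k in ((ampulheta_1, _solvek(ampulheta_1, ampulheta_2)),
--                                      (ampulheta_2, _solvek(ampulheta_2, ampulheta_1)))
--                   if k is not None]
--     return min(candidates) if candidates else None
-- ===== Notes on version B (the rewrite author's own statement) =====
-- stated objective: faster
-- what changed: A races two pointers through all multiples of each hourglass until a remainder hits 3; B solves the two congruences k*a ≡ 3 (mod b) and k*b ≡ 3 (mod a) directly with an extended-Euclid modular inverse and returns the smaller candidate, replacing the unbounded scanning loop by O(log) arithmetic; Pre_ excludes only inputs where A raises ZeroDivisionError (a zero hourglass beside ±1/±3) or loops forever (no multiple can ever show remainder 3).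
import Mathlib
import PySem

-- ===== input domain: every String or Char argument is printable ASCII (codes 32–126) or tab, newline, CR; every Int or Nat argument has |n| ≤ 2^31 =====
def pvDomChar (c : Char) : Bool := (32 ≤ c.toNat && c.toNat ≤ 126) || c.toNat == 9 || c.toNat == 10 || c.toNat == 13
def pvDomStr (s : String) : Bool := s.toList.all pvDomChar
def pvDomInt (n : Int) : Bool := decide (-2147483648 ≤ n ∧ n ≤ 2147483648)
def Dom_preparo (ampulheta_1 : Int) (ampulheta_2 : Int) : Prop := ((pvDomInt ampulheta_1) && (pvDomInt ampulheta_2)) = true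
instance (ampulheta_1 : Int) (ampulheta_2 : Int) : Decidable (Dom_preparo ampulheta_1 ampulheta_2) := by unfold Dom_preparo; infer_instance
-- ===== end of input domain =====

-- B replaces A's unbounded two-pointer race over all multiples by solving the two congruences
-- k*a ≡ 3 (mod b) / k*b ≡ 3 (mod a) with an extended-Euclid modular inverse and taking the
-- smaller candidate, removing the unbounded scanning loop (objective: faster; measured).

-- ===== PORT A =====
-- A's `while True` loop; the fuel argument only makes the recursion total (it is never
-- exhausted on inputs satisfying Pre_preparo, as the proofs below show).
def loopA (a b : Int) : Nat → Int → Int → Option Int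
  | 0, _, _ => none
  | fuel + 1, t1, t2 =>
    let t1' := if t1 ≤ t2 then t1 + a else t1
    if PySem.Int.mod t1' b = 3 then some t1'
    else
      let t2' := if t2 ≤ t1' then t2 + b else t2
      if PySem.Int.mod t2' a = 3 then some t2'
      else loopA a b fuel t1' t2'

def preparo (ampulheta_1 : Int) (ampulheta_2 : Int) : Option Int :=
  if ¬(Int.gcd ampulheta_1 ampulheta_2 = 1 ∨ Int.gcd ampulheta_1 ampulheta_2 = 3) then none
  else loopA ampulheta_1 ampulheta_2
        (2 * (ampulheta_1.natAbs + 2) * (ampulheta_2.natAbs + 2) + 8) 0 0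


-- ===== PORT B =====
-- Source B's `while r1:` extended-Euclid loop (r1 stays ≥ 0 at every call site, so the 0 < r1 guard
-- is Python's `r1 != 0` there, and it also gives termination).
def pvInvLoop (r0 r1 u0 u1 : Int) : Int :=
  if _h : 0 < r1 then
    pvInvLoop r1 (r0 - PySem.Int.floordiv r0 r1 * r1) u1 (u0 - PySem.Int.floordiv r0 r1 * u1)
  else u0
termination_by r1.toNat
decreasing_by
  have h2 := PySem.Int.mod_lt r0 _h
  have h3 := PySem.Int.floordiv_mul_add_mod r0 r1
  omega

def pvInv (x m : Int) : Int := PySem.Int.mod (pvInvLoop (PySem.Int.mod x m) m 1 0) m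

def pvSolvek (step mod : Int) : Option Int :=
  if mod ≤ 3 then none
  else
    let g : Int := Int.gcd step mod
    let u := pvInv (PySem.Int.floordiv step g) (PySem.Int.floordiv mod g)
    some (PySem.Int.mod (PySem.Int.floordiv 3 g * u) (PySem.Int.floordiv mod g))

-- Source B builds the list of the (at most two) defined candidates k*s and returns its minimum,
-- or None when the list is empty; the match below is that list comprehension case by case.
def preparo_alt (ampulheta_1 : Int) (ampulheta_2 : Int) : Option Int :=
  if ¬(Int.gcd ampulheta_1 ampulheta_2 = 1 ∨ Int.gcd ampulheta_1 ampulheta_2 = 3) then none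
  else
    match pvSolvek ampulheta_1 ampulheta_2, pvSolvek ampulheta_2 ampulheta_1 with
    | some k1, some k2 => some (min (k1 * ampulheta_1) (k2 * ampulheta_2))
    | some k1, none => some (k1 * ampulheta_1)
    | none, some k2 => some (k2 * ampulheta_2)
    | none, none => none


-- ===== PRECONDITION & SPEC =====
-- Pre_ excludes exactly the inputs on which A does not return: it raises ZeroDivisionError (a
-- zero hourglass whose partner is in {±1,±3}) or loops forever (no multiple can ever show
-- remainder 3): whenever the gcd test passes, some hourglass must exceed 3 beside a nonzero one.
def Pre_preparo (ampulheta_1 : Int) (ampulheta_2 : Int) : Prop :=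
  (Int.gcd ampulheta_1 ampulheta_2 = 1 ∨ Int.gcd ampulheta_1 ampulheta_2 = 3) →
    ((3 < ampulheta_1 ∧ ampulheta_2 ≠ 0) ∨ (ampulheta_1 ≠ 0 ∧ 3 < ampulheta_2))
instance (ampulheta_1 : Int) (ampulheta_2 : Int) : Decidable (Pre_preparo ampulheta_1 ampulheta_2) := by
  unfold Pre_preparo; infer_instance

def pvWitness_preparo : Int × Int := (5, 7)

def Spec_preparo (ampulheta_1 : Int) (ampulheta_2 : Int) (out : Option Int) : Prop :=
  out = preparo_alt ampulheta_1 ampulheta_2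
instance (ampulheta_1 : Int) (ampulheta_2 : Int) (out : Option Int) : Decidable (Spec_preparo ampulheta_1 ampulheta_2 out) := by
  unfold Spec_preparo; infer_instance

-- ===== CLAIM (what is proved, stated in full; the proofs are below) =====
def Claim_equal_preparo : Prop := ∀ (ampulheta_1 : Int) (ampulheta_2 : Int), Dom_preparo ampulheta_1 ampulheta_2 → Pre_preparo ampulheta_1 ampulheta_2 → Spec_preparo ampulheta_1 ampulheta_2 (preparo ampulheta_1 ampulheta_2)

-- ===== LEMMAS AND PROOFS =====

-- `Hit s n k`: hourglass of size s, flipped k times, shows remainder 3 against modulus n.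
def Hit (s n k : Int) : Prop := PySem.Int.mod (s * k) n = 3

theorem hit_three_lt {s n k : Int} (hn : 0 < n) (h : Hit s n k) : 3 < n := by
  have := PySem.Int.mod_lt (s * k) hn; unfold Hit at h; omega

theorem hit_modeq {s n k : Int} (hn : 0 < n) (h : Hit s n k) : s * k ≡ 3 [ZMOD n] := by
  have h3 : 3 < n := hit_three_lt hn h
  unfold Hit at h
  rw [PySem.Int.mod_eq_emod_of_pos hn] at h
  unfold Int.ModEq
  rw [h, Int.emod_eq_of_lt (by omega) h3]

theorem not_hit_of_le_three {s n k : Int} (hn : 0 < n) (hn3 : n ≤ 3) : ¬ Hit s n k := by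
  intro h; exact absurd (hit_three_lt hn h) (by omega)

theorem hit_pos {s n k : Int} (hk : 0 ≤ k) (h : Hit s n k) : 1 ≤ k := by
  rcases lt_or_ge 0 k with h1 | h1
  · omega
  · exfalso
    have hk0 : k = 0 := by omega
    unfold Hit at h
    rw [hk0, mul_zero] at h
    rw [(PySem.Int.mod_eq_zero_iff_dvd 0 n).2 (dvd_zero n)] at h
    exact absurd h (by norm_num)

theorem gcd_emod_left (a b : Int) : Int.gcd (a % b) b = Int.gcd a b := by
  apply Nat.dvd_antisymm
  · apply Int.dvd_gcd
    · have h1 : (↑(Int.gcd (a % b) b) : Int) ∣ a % b := Int.gcd_dvd_left _ _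
      have h2 : (↑(Int.gcd (a % b) b) : Int) ∣ b := Int.gcd_dvd_right _ _
      have hd : (↑(Int.gcd (a % b) b) : Int) ∣ b * (a / b) + a % b :=
        dvd_add (h2.mul_right _) h1
      have heq : b * (a / b) + a % b = a := Int.mul_ediv_add_emod a b
      rwa [heq] at hd
    · exact Int.gcd_dvd_right _ _
  · apply Int.dvd_gcd
    · have h1 : (↑(Int.gcd a b) : Int) ∣ a := Int.gcd_dvd_left _ _
      have h2 : (↑(Int.gcd a b) : Int) ∣ b := Int.gcd_dvd_right _ _
      have hd : (↑(Int.gcd a b) : Int) ∣ a - b * (a / b) := dvd_sub h1 (h2.mul_right _)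
      have heq : a - b * (a / b) = a % b := by
        have := Int.mul_ediv_add_emod a b; omega
      rwa [heq] at hd
    · exact Int.gcd_dvd_right _ _

theorem pvInvLoop_spec (x m : Int) : ∀ (r0 r1 u0 u1 : Int), 0 ≤ r0 → 0 ≤ r1 →
    r0 ≡ u0 * x [ZMOD m] → r1 ≡ u1 * x [ZMOD m] →
    pvInvLoop r0 r1 u0 u1 * x ≡ (Int.gcd r0 r1 : Int) [ZMOD m] := by
  intro r0 r1 u0 u1
  induction r0, r1, u0, u1 using pvInvLoop.induct with
  | case1 r0 r1 u0 u1 h ih =>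
    intro hr0 hr1 h0 h1
    rw [pvInvLoop, dif_pos h]
    have hq := PySem.Int.floordiv_mul_add_mod r0 r1
    have hmnn := PySem.Int.mod_nonneg r0 h
    have hrw : r0 - PySem.Int.floordiv r0 r1 * r1 = PySem.Int.mod r0 r1 := by omega
    have hnewEq : r0 - PySem.Int.floordiv r0 r1 * r1 ≡ (u0 - PySem.Int.floordiv r0 r1 * u1) * x [ZMOD m] := by
      have := (h0.sub ((h1.mul_left (PySem.Int.floordiv r0 r1))))
      calc r0 - PySem.Int.floordiv r0 r1 * r1 ≡ u0 * x - PySem.Int.floordiv r0 r1 * (u1 * x) [ZMOD m] := this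
        _ = (u0 - PySem.Int.floordiv r0 r1 * u1) * x := by ring
    have hres := ih (le_of_lt h) (by omega) h1 hnewEq
    have hgcd : Int.gcd r1 (r0 - PySem.Int.floordiv r0 r1 * r1) = Int.gcd r0 r1 := by
      have : r0 - PySem.Int.floordiv r0 r1 * r1 = r0 % r1 := by
        rw [hrw, PySem.Int.mod_eq_emod_of_pos h]
      rw [this, Int.gcd_comm r1 (r0 % r1), gcd_emod_left]
    rwa [hgcd] at hres
  | case2 r0 r1 u0 u1 h =>
    intro hr0 hr1 h0 h1
    rw [pvInvLoop, dif_neg h]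
    have hz : r1 = 0 := by omega
    rw [hz, Int.gcd_zero_right, Int.natAbs_of_nonneg hr0]
    exact h0.symm

theorem pvInv_spec (x m : Int) (hm : 0 < m) (hx : Int.gcd x m = 1) :
    pvInv x m * x ≡ 1 [ZMOD m] := by
  have hr0 : (0:Int) ≤ PySem.Int.mod x m := PySem.Int.mod_nonneg x hm
  have h0 : PySem.Int.mod x m ≡ 1 * x [ZMOD m] := by
    rw [PySem.Int.mod_eq_emod_of_pos hm, one_mul]
    exact Int.emod_emod_of_dvd x dvd_rfl
  have h1 : m ≡ 0 * x [ZMOD m] := by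
    unfold Int.ModEq; simp
  have hres := pvInvLoop_spec x m _ _ _ _ hr0 (le_of_lt hm) h0 h1
  have hgcd : Int.gcd (PySem.Int.mod x m) m = 1 := by
    rw [PySem.Int.mod_eq_emod_of_pos hm, gcd_emod_left, hx]
  rw [hgcd] at hres
  unfold pvInv
  rw [PySem.Int.mod_eq_emod_of_pos hm]
  calc (pvInvLoop (PySem.Int.mod x m) m 1 0) % m * x
      ≡ (pvInvLoop (PySem.Int.mod x m) m 1 0) * x [ZMOD m] :=
        Int.ModEq.mul_right x (Int.emod_emod_of_dvd _ dvd_rfl)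
    _ ≡ 1 [ZMOD m] := by exact_mod_cast hres

theorem pvSolvek_none (s n : Int) (hn : n ≤ 3) : pvSolvek s n = none := by
  unfold pvSolvek; rw [if_pos hn]

theorem pvSolvek_spec (s n : Int) (hn : 3 < n)
    (hg : Int.gcd s n = 1 ∨ Int.gcd s n = 3) :
    ∃ K : Int, pvSolvek s n = some K ∧ 1 ≤ K ∧ K ≤ n ∧ Hit s n K ∧
      (∀ k : Int, 1 ≤ k → k < K → ¬ Hit s n k) := by
  have hgpos : 0 < Int.gcd s n := by rcases hg with h | h <;> omega
  set g : Int := (Int.gcd s n : Int) with hgdef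
  have hg1 : (0:Int) < g := by rw [hgdef]; exact_mod_cast hgpos
  have hgi : g = 1 ∨ g = 3 := by
    rcases hg with h | h <;> [left; right] <;> rw [hgdef, h] <;> rfl
  have hds : g ∣ s := Int.gcd_dvd_left _ _
  have hdn : g ∣ n := Int.gcd_dvd_right _ _
  set s' : Int := s / g with hs'def
  set n' : Int := n / g with hn'def
  have hsg : g * s' = s := Int.mul_ediv_cancel' hds
  have hng : g * n' = n := Int.mul_ediv_cancel' hdn
  have hcg : g * (3 / g) = 3 := by rcases hgi with h | h <;> rw [h] <;> norm_num
  set c : Int := 3 / g with hcdef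
  have hn'2 : 2 ≤ n' := by rcases hgi with h | h <;> rw [h] at hng <;> omega
  have hn'pos : (0:Int) < n' := by omega
  have hcop : Int.gcd s' n' = 1 := Int.gcd_div_gcd_div_gcd hgpos
  set u : Int := pvInv s' n' with hudef
  have hu : u * s' ≡ 1 [ZMOD n'] := pvInv_spec s' n' hn'pos hcop
  set K : Int := PySem.Int.mod (c * u) n' with hKdef
  have hKemod : K = (c * u) % n' := by rw [hKdef, PySem.Int.mod_eq_emod_of_pos hn'pos]
  have hK0 : 0 ≤ K := PySem.Int.mod_nonneg _ hn'pos
  have hKlt : K < n' := PySem.Int.mod_lt _ hn'pos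
  have hiff : ∀ k : Int, Hit s n k ↔ k ≡ K [ZMOD n'] := by
    intro k
    have hnpos : (0:Int) < n := by omega
    have ha : Hit s n k ↔ s * k ≡ 3 [ZMOD n] := by
      unfold Hit
      rw [PySem.Int.mod_eq_emod_of_pos hnpos]
      unfold Int.ModEq
      rw [Int.emod_eq_of_lt (by norm_num) hn]
    have hb : (s * k ≡ 3 [ZMOD n]) ↔ n' ∣ (c - s' * k) := by
      rw [Int.modEq_iff_dvd]
      constructor
      · intro h
        have h2 : g * n' ∣ g * (c - s' * k) := by
          rw [hng]
          have : g * (c - s' * k) = 3 - s * k := by rw [← hcg, ← hsg]; ring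
          rwa [this]
        exact (mul_dvd_mul_iff_left (by omega : g ≠ 0)).mp h2
      · intro h
        have h2 : g * n' ∣ g * (c - s' * k) := (mul_dvd_mul_iff_left (by omega : g ≠ 0)).mpr h
        rw [hng] at h2
        have : g * (c - s' * k) = 3 - s * k := by rw [← hcg, ← hsg]; ring
        rwa [this] at h2
    have hc : (n' ∣ (c - s' * k)) ↔ s' * k ≡ c [ZMOD n'] := (Int.modEq_iff_dvd).symm
    have hd : (s' * k ≡ c [ZMOD n']) ↔ k ≡ c * u [ZMOD n'] := by
      constructor
      · intro h
        calc k = 1 * k := by ring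
          _ ≡ (u * s') * k [ZMOD n'] := (hu.symm).mul_right k
          _ = u * (s' * k) := by ring
          _ ≡ u * c [ZMOD n'] := h.mul_left u
          _ = c * u := by ring
      · intro h
        calc s' * k ≡ s' * (c * u) [ZMOD n'] := h.mul_left s'
          _ = c * (u * s') := by ring
          _ ≡ c * 1 [ZMOD n'] := hu.mul_left c
          _ = c := by ring
    have he : c * u ≡ K [ZMOD n'] := by
      rw [hKemod]
      exact (Int.emod_emod_of_dvd _ dvd_rfl).symm
    rw [ha, hb, hc, hd]
    constructor
    · intro h; exact h.trans he
    · intro h; exact h.trans he.symm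
  have hK1 : 1 ≤ K := by
    rcases lt_or_ge K 1 with h | h
    · exfalso
      have hKz : K = 0 := by omega
      have h0 : Hit s n 0 := by
        rw [hiff 0, hKz]
      unfold Hit at h0
      rw [mul_zero, (PySem.Int.mod_eq_zero_iff_dvd 0 n).2 (dvd_zero n)] at h0
      exact absurd h0 (by norm_num)
    · exact h
  have hKn : K ≤ n := by
    have : n' ≤ n := by rcases hgi with h | h <;> rw [h] at hng <;> omega
    omega
  have hHit : Hit s n K := (hiff K).mpr (Int.ModEq.refl K)
  refine ⟨K, ?_, hK1, hKn, hHit, ?_⟩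
  · unfold pvSolvek
    rw [if_neg (by omega)]
    simp only
    rw [PySem.Int.floordiv_eq_ediv_of_pos hg1, PySem.Int.floordiv_eq_ediv_of_pos hg1,
        PySem.Int.floordiv_eq_ediv_of_pos hg1]
  · intro k hk1 hkK hHitk
    have hcong := (hiff k).mp hHitk
    have hdvd : n' ∣ K - k := (Int.modEq_iff_dvd).mp hcong
    have := Int.le_of_dvd (by omega) hdvd
    omega

theorem loopA_negb (a b K : Int) (ha : 3 < a) (hb : b < 0)
    (_hK : 1 ≤ K) (hHit : Hit b a K) (hmin : ∀ k : Int, 1 ≤ k → k < K → ¬ Hit b a k) :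
    ∀ (fuel : Nat) (j : Int), 1 ≤ j → j < K → K < (fuel : Int) + j →
      loopA a b fuel a (b * j) = some (b * K) := by
  intro fuel
  induction fuel with
  | zero => intro j h1 h2 h3; exfalso; push_cast at h3; omega
  | succ f ih =>
    intro j hj1 hjK hfuel
    have hbj_neg : b * j < 0 := mul_neg_of_neg_of_pos hb (by omega)
    simp only [loopA]
    have hc1 : ¬ (a ≤ b * j) := by linarith
    simp only [if_neg hc1]
    have hm1 := PySem.Int.mod_neg_bounds a hb
    have hf1 : ¬ (PySem.Int.mod a b = 3) := by omega
    simp only [if_neg hf1]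
    have hc2 : b * j ≤ a := by linarith
    simp only [if_pos hc2]
    have hstep : b * j + b = b * (j + 1) := by ring
    rw [hstep]
    by_cases hK2 : j + 1 = K
    · have hcond : PySem.Int.mod (b * (j + 1)) a = 3 := by rw [hK2]; exact hHit
      rw [if_pos hcond, hK2]
    · have hnH : ¬ (PySem.Int.mod (b * (j + 1)) a = 3) := hmin _ (by omega) (by omega)
      rw [if_neg hnH]
      apply ih (j + 1) (by omega) (by omega)
      push_cast at hfuel ⊢; omega

theorem loopA_nega (a b K : Int) (ha : a < 0) (_hb : 3 < b)
    (_hK : 1 ≤ K) (hHit : Hit a b K) (hmin : ∀ k : Int, 1 ≤ k → k < K → ¬ Hit a b k) :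
    ∀ (fuel : Nat) (i : Int), 1 ≤ i → i < K → K < (fuel : Int) + i →
      loopA a b fuel (a * i) 0 = some (a * K) := by
  intro fuel
  induction fuel with
  | zero => intro i h1 h2 h3; exfalso; push_cast at h3; omega
  | succ f ih =>
    intro i hi1 hiK hfuel
    have hai_neg : a * i < 0 := mul_neg_of_neg_of_pos ha (by omega)
    simp only [loopA]
    have hc1 : (a * i ≤ 0) := by linarith
    simp only [if_pos hc1]
    have hstep : a * i + a = a * (i + 1) := by ring
    rw [hstep]
    by_cases hK2 : i + 1 = K
    · have hcond : PySem.Int.mod (a * (i + 1)) b = 3 := by rw [hK2]; exact hHit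
      rw [if_pos hcond, hK2]
    · have hnH : ¬ (PySem.Int.mod (a * (i + 1)) b = 3) := hmin _ (by omega) (by omega)
      rw [if_neg hnH]
      have hai1_neg : a * (i + 1) < 0 := mul_neg_of_neg_of_pos ha (by omega)
      have hc2 : ¬ ((0:Int) ≤ a * (i + 1)) := by linarith
      simp only [if_neg hc2]
      have hf2 : ¬ (PySem.Int.mod (0:Int) a = 3) := by
        rw [(PySem.Int.mod_eq_zero_iff_dvd 0 a).2 (dvd_zero a)]; norm_num
      simp only [if_neg hf2]
      apply ih (i + 1) (by omega) (by omega)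
      push_cast at hfuel ⊢; omega

theorem loopA_race (a b T : Int) (ha : 0 < a) (hb : 0 < b)
    (h1 : ∀ k : Int, 1 ≤ k → Hit a b k → T ≤ a * k)
    (h2 : ∀ k : Int, 1 ≤ k → Hit b a k → T ≤ b * k)
    (hT : (∃ k : Int, 1 ≤ k ∧ Hit a b k ∧ a * k = T) ∨
          (∃ k : Int, 1 ≤ k ∧ Hit b a k ∧ b * k = T)) :
    ∀ (fuel : Nat) (i j : Int), 0 ≤ i → 0 ≤ j →
      (∀ k : Int, 1 ≤ k → k ≤ i → ¬ Hit a b k) →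
      (∀ k : Int, 1 ≤ k → k ≤ j → ¬ Hit b a k) →
      a * i ≤ b * j + a → b * j ≤ a * i + b →
      2 * T + a + b < (fuel : Int) + a * i + b * j →
      loopA a b fuel (a * i) (b * j) = some T := by
  intro fuel
  induction fuel with
  | zero =>
    intro i j hi hj inv1 inv2 ho1 ho2 hfuel
    exfalso
    push_cast at hfuel
    rcases hT with ⟨k1, hk1, hH1, hEq⟩ | ⟨k2, hk2, hH2, hEq⟩
    · have hik : i < k1 := by
        by_contra hcon; exact inv1 k1 hk1 (by omega) hH1
      have hle : a * i ≤ a * (k1 - 1) := mul_le_mul_of_nonneg_left (by omega) ha.le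
      have heq2 : a * (k1 - 1) = T - a := by rw [← hEq]; ring
      linarith
    · have hjk : j < k2 := by
        by_contra hcon; exact inv2 k2 hk2 (by omega) hH2
      have hle : b * j ≤ b * (k2 - 1) := mul_le_mul_of_nonneg_left (by omega) hb.le
      have heq2 : b * (k2 - 1) = T - b := by rw [← hEq]; ring
      linarith
  | succ f ih =>
    intro i j hi hj inv1 inv2 ho1 ho2 hfuel
    push_cast at hfuel
    simp only [loopA]
    by_cases hc1 : a * i ≤ b * j
    · simp only [if_pos hc1, show a * i + a = a * (i + 1) from by ring]
      by_cases hf1 : PySem.Int.mod (a * (i + 1)) b = 3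
      · simp only [if_pos hf1]
        have hH1' : Hit a b (i + 1) := hf1
        have hge : T ≤ a * (i + 1) := h1 _ (by omega) hH1'
        have hb3 : 3 < b := hit_three_lt hb hH1'
        rcases eq_or_lt_of_le hge with heq | hlt
        · rw [← heq]
        · exfalso
          rcases hT with ⟨k1, hk1, hH1, hEq⟩ | ⟨k2, hk2, hH2, hEq⟩
          · have hik : k1 < i + 1 := by
              have : a * k1 < a * (i + 1) := by rw [hEq]; exact hlt
              exact lt_of_mul_lt_mul_left this ha.le
            exact inv1 k1 hk1 (by omega) hH1
          · have ha3 : 3 < a := hit_three_lt ha hH2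
            have hjk : j < k2 := by
              by_contra hcon; exact inv2 k2 hk2 (by omega) hH2
            have hbj : b * j ≤ b * (k2 - 1) := mul_le_mul_of_nonneg_left (by omega) hb.le
            have hbk : b * (k2 - 1) = T - b := by rw [← hEq]; ring
            have hvle : a * (i + 1) - T ≤ a - b := by
              have h5 : a * (i + 1) = a * i + a := by ring
              linarith
            have hTm : b * k2 ≡ 3 [ZMOD a] := hit_modeq ha hH2
            have hdvd3 : a ∣ 3 - b * k2 := (Int.modEq_iff_dvd).mp hTm
            have hdvd : a ∣ a * (i + 1) - T + 3 := by
              have h6 : a * (i + 1) - T + 3 = a * (i + 1) + (3 - b * k2) := by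
                rw [← hEq]; ring
              rw [h6]; exact dvd_add (dvd_mul_right a (i + 1)) hdvd3
            have hlow := Int.le_of_dvd (by linarith) hdvd
            linarith
      · simp only [if_neg hf1]
        by_cases hc2 : b * j ≤ a * (i + 1)
        · simp only [if_pos hc2, show b * j + b = b * (j + 1) from by ring]
          by_cases hf2 : PySem.Int.mod (b * (j + 1)) a = 3
          · simp only [if_pos hf2]
            have hH2' : Hit b a (j + 1) := hf2
            have hge : T ≤ b * (j + 1) := h2 _ (by omega) hH2'
            have ha3 : 3 < a := hit_three_lt ha hH2'
            rcases eq_or_lt_of_le hge with heq | hlt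
            · rw [← heq]
            · exfalso
              rcases hT with ⟨k1, hk1, hH1, hEq⟩ | ⟨k2, hk2, hH2, hEq⟩
              · have hb3 : 3 < b := hit_three_lt hb hH1
                have hik : i + 1 < k1 := by
                  by_contra hcon
                  have hcase : k1 ≤ i ∨ k1 = i + 1 := by omega
                  rcases hcase with hcase | hcase
                  · exact inv1 k1 hk1 hcase hH1
                  · rw [hcase] at hH1; exact hf1 hH1
                have hai : a * (i + 1) ≤ a * (k1 - 1) := mul_le_mul_of_nonneg_left (by omega) ha.le
                have hak : a * (k1 - 1) = T - a := by rw [← hEq]; ring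
                have hvle : b * (j + 1) - T ≤ b - a := by
                  have h5 : b * (j + 1) = b * j + b := by ring
                  linarith
                have hTm : a * k1 ≡ 3 [ZMOD b] := hit_modeq hb hH1
                have hdvd3 : b ∣ 3 - a * k1 := (Int.modEq_iff_dvd).mp hTm
                have hdvd : b ∣ b * (j + 1) - T + 3 := by
                  have h6 : b * (j + 1) - T + 3 = b * (j + 1) + (3 - a * k1) := by
                    rw [← hEq]; ring
                  rw [h6]; exact dvd_add (dvd_mul_right b (j + 1)) hdvd3
                have hlow := Int.le_of_dvd (by linarith) hdvd
                linarith
              · have hjk : k2 < j + 1 := by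
                  have : b * k2 < b * (j + 1) := by rw [hEq]; exact hlt
                  exact lt_of_mul_lt_mul_left this hb.le
                exact inv2 k2 hk2 (by omega) hH2
          · simp only [if_neg hf2]
            apply ih (i + 1) (j + 1) (by omega) (by omega)
            · intro k hk hki
              rcases (by omega : k ≤ i ∨ k = i + 1) with hcase | hcase
              · exact inv1 k hk hcase
              · rw [hcase]; exact hf1
            · intro k hk hkj
              rcases (by omega : k ≤ j ∨ k = j + 1) with hcase | hcase
              · exact inv2 k hk hcase
              · rw [hcase]; exact hf2
            · have h5 : a * (i + 1) = a * i + a := by ring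
              have h6 : b * (j + 1) = b * j + b := by ring
              linarith
            · have h6 : b * (j + 1) = b * j + b := by ring
              linarith
            · have h5 : a * (i + 1) = a * i + a := by ring
              have h6 : b * (j + 1) = b * j + b := by ring
              linarith
        · simp only [if_neg hc2]
          have hf2 : ¬ (PySem.Int.mod (b * j) a = 3) := by
            intro h
            exact inv2 j (hit_pos hj h) le_rfl h
          simp only [if_neg hf2]
          apply ih (i + 1) j (by omega) hj
          · intro k hk hki
            rcases (by omega : k ≤ i ∨ k = i + 1) with hcase | hcase
            · exact inv1 k hk hcase
            · rw [hcase]; exact hf1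
          · exact inv2
          · linarith
          · linarith
          · have h5 : a * (i + 1) = a * i + a := by ring
            linarith
    · simp only [if_neg hc1]
      have hf1 : ¬ (PySem.Int.mod (a * i) b = 3) := by
        intro h
        exact inv1 i (hit_pos hi h) le_rfl h
      simp only [if_neg hf1]
      have hc2 : b * j ≤ a * i := by linarith
      simp only [if_pos hc2, show b * j + b = b * (j + 1) from by ring]
      by_cases hf2 : PySem.Int.mod (b * (j + 1)) a = 3
      · simp only [if_pos hf2]
        have hH2' : Hit b a (j + 1) := hf2
        have hge : T ≤ b * (j + 1) := h2 _ (by omega) hH2'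
        have ha3 : 3 < a := hit_three_lt ha hH2'
        rcases eq_or_lt_of_le hge with heq | hlt
        · rw [← heq]
        · exfalso
          rcases hT with ⟨k1, hk1, hH1, hEq⟩ | ⟨k2, hk2, hH2, hEq⟩
          · have hb3 : 3 < b := hit_three_lt hb hH1
            have hik : i < k1 := by
              by_contra hcon; exact inv1 k1 hk1 (by omega) hH1
            have hai : a * i ≤ a * (k1 - 1) := mul_le_mul_of_nonneg_left (by omega) ha.le
            have hak : a * (k1 - 1) = T - a := by rw [← hEq]; ring
            have hvle : b * (j + 1) - T ≤ b - a := by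
              have h5 : b * (j + 1) = b * j + b := by ring
              linarith
            have hTm : a * k1 ≡ 3 [ZMOD b] := hit_modeq hb hH1
            have hdvd3 : b ∣ 3 - a * k1 := (Int.modEq_iff_dvd).mp hTm
            have hdvd : b ∣ b * (j + 1) - T + 3 := by
              have h6 : b * (j + 1) - T + 3 = b * (j + 1) + (3 - a * k1) := by
                rw [← hEq]; ring
              rw [h6]; exact dvd_add (dvd_mul_right b (j + 1)) hdvd3
            have hlow := Int.le_of_dvd (by linarith) hdvd
            linarith
          · have hjk : k2 < j + 1 := by
              have : b * k2 < b * (j + 1) := by rw [hEq]; exact hlt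
              exact lt_of_mul_lt_mul_left this hb.le
            exact inv2 k2 hk2 (by omega) hH2
      · simp only [if_neg hf2]
        apply ih i (j + 1) hi (by omega)
        · exact inv1
        · intro k hk hkj
          rcases (by omega : k ≤ j ∨ k = j + 1) with hcase | hcase
          · exact inv2 k hk hcase
          · rw [hcase]; exact hf2
        · have h6 : b * (j + 1) = b * j + b := by ring
          linarith
        · have h6 : b * (j + 1) = b * j + b := by ring
          linarith
        · have h6 : b * (j + 1) = b * j + b := by ring
          linarith

theorem main_equiv (a b : Int)
    (hPre : (Int.gcd a b = 1 ∨ Int.gcd a b = 3) → ((3 < a ∧ b ≠ 0) ∨ (a ≠ 0 ∧ 3 < b))) :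
    preparo a b = preparo_alt a b := by
  unfold preparo preparo_alt
  by_cases hg : (Int.gcd a b = 1 ∨ Int.gcd a b = 3)
  case neg => rw [if_pos hg, if_pos hg]
  case pos =>
  rw [if_neg (not_not_intro hg), if_neg (not_not_intro hg)]
  have hdisj := hPre hg
  have hFcast : ((2 * (a.natAbs + 2) * (b.natAbs + 2) + 8 : Nat) : Int)
      = 2 * (|a| + 2) * (|b| + 2) + 8 := by
    push_cast [Int.natCast_natAbs]; ring
  by_cases hab : 0 < a ∧ 0 < b
  · obtain ⟨ha, hb⟩ := hab
    rw [abs_of_pos ha, abs_of_pos hb] at hFcast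
    by_cases hb3 : 3 < b
    · obtain ⟨K1, hS1, hK11, hK1b, hHit1, hmin1⟩ := pvSolvek_spec a b hb3 hg
      by_cases ha3 : 3 < a
      · obtain ⟨K2, hS2, hK21, hK2a, hHit2, hmin2⟩ :=
          pvSolvek_spec b a ha3 (by rwa [Int.gcd_comm])
        rw [hS1, hS2]
        show loopA a b _ 0 0 = some (min (K1 * a) (K2 * b))
        have hrace := loopA_race a b (min (K1 * a) (K2 * b)) ha hb
          (by
            intro k hk hH
            have hK1k : K1 ≤ k := by
              by_contra hcon; exact hmin1 k hk (by omega) hH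
            calc min (K1 * a) (K2 * b) ≤ K1 * a := min_le_left _ _
              _ ≤ k * a := mul_le_mul_of_nonneg_right hK1k ha.le
              _ = a * k := mul_comm _ _)
          (by
            intro k hk hH
            have hK2k : K2 ≤ k := by
              by_contra hcon; exact hmin2 k hk (by omega) hH
            calc min (K1 * a) (K2 * b) ≤ K2 * b := min_le_right _ _
              _ ≤ k * b := mul_le_mul_of_nonneg_right hK2k hb.le
              _ = b * k := mul_comm _ _)
          (by
            rcases min_cases (K1 * a) (K2 * b) with ⟨hm, _⟩ | ⟨hm, _⟩
            · exact Or.inl ⟨K1, hK11, hHit1, by rw [mul_comm]; exact hm.symm⟩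
            · exact Or.inr ⟨K2, hK21, hHit2, by rw [mul_comm]; exact hm.symm⟩)
          (2 * (a.natAbs + 2) * (b.natAbs + 2) + 8) 0 0 le_rfl le_rfl
          (by intro k hk hk0; exact absurd hk0 (by omega))
          (by intro k hk hk0; exact absurd hk0 (by omega))
          (by simp; linarith) (by simp; linarith)
          (by
            rw [hFcast]
            have hTle : min (K1 * a) (K2 * b) ≤ b * a := by
              calc min (K1 * a) (K2 * b) ≤ K1 * a := min_le_left _ _
                _ ≤ b * a := mul_le_mul_of_nonneg_right hK1b ha.le
            nlinarith)
        simpa using hrace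
      · have ha3' : a ≤ 3 := by omega
        rw [hS1, pvSolvek_none b a ha3']
        show loopA a b _ 0 0 = some (K1 * a)
        have hrace := loopA_race a b (K1 * a) ha hb
          (by
            intro k hk hH
            have hK1k : K1 ≤ k := by
              by_contra hcon; exact hmin1 k hk (by omega) hH
            calc K1 * a ≤ k * a := mul_le_mul_of_nonneg_right hK1k ha.le
              _ = a * k := mul_comm _ _)
          (by intro k hk hH; exact absurd hH (not_hit_of_le_three ha ha3'))
          (Or.inl ⟨K1, hK11, hHit1, by rw [mul_comm]⟩)
          (2 * (a.natAbs + 2) * (b.natAbs + 2) + 8) 0 0 le_rfl le_rfl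
          (by intro k hk hk0; exact absurd hk0 (by omega))
          (by intro k hk hk0; exact absurd hk0 (by omega))
          (by simp; linarith) (by simp; linarith)
          (by
            rw [hFcast]
            have hTle : K1 * a ≤ b * a := mul_le_mul_of_nonneg_right hK1b ha.le
            nlinarith)
        simpa using hrace
    · have hb3' : b ≤ 3 := by omega
      have ha3 : 3 < a := by
        rcases hdisj with ⟨h, _⟩ | ⟨_, h⟩
        · exact h
        · omega
      obtain ⟨K2, hS2, hK21, hK2a, hHit2, hmin2⟩ :=
        pvSolvek_spec b a ha3 (by rwa [Int.gcd_comm])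
      rw [hS2, pvSolvek_none a b hb3']
      show loopA a b _ 0 0 = some (K2 * b)
      have hrace := loopA_race a b (K2 * b) ha hb
        (by intro k hk hH; exact absurd hH (not_hit_of_le_three hb hb3'))
        (by
          intro k hk hH
          have hK2k : K2 ≤ k := by
            by_contra hcon; exact hmin2 k hk (by omega) hH
          calc K2 * b ≤ k * b := mul_le_mul_of_nonneg_right hK2k hb.le
            _ = b * k := mul_comm _ _)
        (Or.inr ⟨K2, hK21, hHit2, by rw [mul_comm]⟩)
        (2 * (a.natAbs + 2) * (b.natAbs + 2) + 8) 0 0 le_rfl le_rfl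
        (by intro k hk hk0; exact absurd hk0 (by omega))
        (by intro k hk hk0; exact absurd hk0 (by omega))
        (by simp; linarith) (by simp; linarith)
        (by
          rw [hFcast]
          have hTle : K2 * b ≤ a * b := mul_le_mul_of_nonneg_right hK2a hb.le
          nlinarith)
      simpa using hrace
  · by_cases hab2 : 0 < a ∧ b < 0
    · obtain ⟨ha, hbneg⟩ := hab2
      rw [abs_of_pos ha, abs_of_neg hbneg] at hFcast
      have ha3 : 3 < a := by
        rcases hdisj with ⟨h, _⟩ | ⟨_, h⟩
        · exact h
        · omega
      obtain ⟨K, hS, hK1, hKa, hHit, hmin⟩ :=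
        pvSolvek_spec b a ha3 (by rwa [Int.gcd_comm])
      rw [hS, pvSolvek_none a b (by omega)]
      show loopA a b _ 0 0 = some (K * b)
      rw [mul_comm K b]
      obtain ⟨f, hf⟩ : ∃ f, 2 * (a.natAbs + 2) * (b.natAbs + 2) + 8 = f + 1 :=
        ⟨2 * (a.natAbs + 2) * (b.natAbs + 2) + 7, by omega⟩
      have hfcast : (f : Int) = 2 * (a + 2) * (-b + 2) + 7 := by
        have h9 : ((f + 1 : Nat) : Int) = 2 * (a + 2) * (-b + 2) + 8 := by
          rw [← hf]; exact hFcast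
        push_cast at h9 ⊢; omega
      rw [hf]
      simp only [loopA, zero_add, if_pos (le_refl (0 : Int))]
      have hm1 := PySem.Int.mod_neg_bounds a hbneg
      rw [if_neg (by omega : ¬ PySem.Int.mod a b = 3), if_pos ha.le]
      have hH1iff : Hit b a 1 ↔ PySem.Int.mod b a = 3 := by unfold Hit; rw [mul_one]
      by_cases hfire : PySem.Int.mod b a = 3
      · rw [if_pos hfire]
        have hKone : K = 1 := by
          by_contra hKne
          exact hmin 1 le_rfl (by omega) (hH1iff.mpr hfire)
        rw [hKone, mul_one]
      · rw [if_neg hfire]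
        have hKgt : 1 < K := by
          rcases eq_or_lt_of_le hK1 with h | h
          · exact absurd (hH1iff.mp (h ▸ hHit)) hfire
          · exact h
        have hres := loopA_negb a b K ha3 hbneg hK1 hHit hmin f 1 le_rfl hKgt
          (by rw [hfcast]; nlinarith)
        rwa [mul_one] at hres
    · by_cases hab3 : a < 0 ∧ 0 < b
      · obtain ⟨haneg, hb⟩ := hab3
        rw [abs_of_neg haneg, abs_of_pos hb] at hFcast
        have hb3 : 3 < b := by
          rcases hdisj with ⟨h, _⟩ | ⟨_, h⟩
          · omega
          · exact h
        obtain ⟨K, hS, hK1, hKb, hHit, hmin⟩ := pvSolvek_spec a b hb3 hg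
        rw [hS, pvSolvek_none b a (by omega)]
        show loopA a b _ 0 0 = some (K * a)
        rw [mul_comm K a]
        obtain ⟨f, hf⟩ : ∃ f, 2 * (a.natAbs + 2) * (b.natAbs + 2) + 8 = f + 1 :=
          ⟨2 * (a.natAbs + 2) * (b.natAbs + 2) + 7, by omega⟩
        have hfcast : (f : Int) = 2 * (-a + 2) * (b + 2) + 7 := by
          have h9 : ((f + 1 : Nat) : Int) = 2 * (-a + 2) * (b + 2) + 8 := by
            rw [← hf]; exact hFcast
          push_cast at h9 ⊢; omega
        rw [hf]
        simp only [loopA, zero_add, if_pos (le_refl (0 : Int))]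
        have hH1iff : Hit a b 1 ↔ PySem.Int.mod a b = 3 := by unfold Hit; rw [mul_one]
        by_cases hfire : PySem.Int.mod a b = 3
        · rw [if_pos hfire]
          have hKone : K = 1 := by
            by_contra hKne
            exact hmin 1 le_rfl (by omega) (hH1iff.mpr hfire)
          rw [hKone, mul_one]
        · rw [if_neg hfire]
          rw [if_neg (by linarith : ¬ (0:Int) ≤ a)]
          rw [if_neg (by
            rw [(PySem.Int.mod_eq_zero_iff_dvd 0 a).2 (dvd_zero a)]; norm_num :
              ¬ PySem.Int.mod (0:Int) a = 3)]
          have hKgt : 1 < K := by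
            rcases eq_or_lt_of_le hK1 with h | h
            · exact absurd (hH1iff.mp (h ▸ hHit)) hfire
            · exact h
          have hres := loopA_nega a b K haneg hb3 hK1 hHit hmin f 1 le_rfl hKgt
            (by rw [hfcast]; nlinarith)
          rwa [mul_one] at hres
      · exfalso
        rcases hdisj with ⟨h3a, hbne⟩ | ⟨hane, h3b⟩ <;> omega

-- ===== VERDICT (by name: the statement is the Claim_ definition above) =====
theorem preparo_spec : Claim_equal_preparo := by
  intro ampulheta_1 ampulheta_2 _ hPre
  exact main_equiv ampulheta_1 ampulheta_2 hPre
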